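-- pv_equiv track=rewrite | github.com/Idosho1/Search-Engines | tokenizer.py | findAbbreviation
-- ===== SOURCE A (Python) =====
-- def findAbbreviation(word):
--     if word.find('.') != 1:
--         return -1
--
--     i = 0
--     wordToAdd = ""
--     nextDot = False
--     while i < len(word):
--         nextChar = word[i]
--         i += 1
--         if nextChar != '.':
--             if nextDot:
--                 return i-2
--             else:
--                 nextDot = True
--                 wordToAdd += nextChar
--         else:
--             nextDot = False
--
--     return len(word)
-- ===== SOURCE B (Python) =====
-- def findAbbreviation(word):
--     if word.find('.') != 1:
--         return -1
--     pos = 0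
--     for part in word.split('.'):
--         if len(part) >= 2:
--             return pos
--         pos += len(part) + 1
--     return len(word)
-- ===== Notes on version B (the rewrite author's own statement) =====
-- stated objective: alternative
-- what changed: Replaces A's per-character state machine (index counter, nextDot flag, accumulated string) with a staged computation: split the word on '.' into runs and scan the runs, returning the start offset of the first run of length >= 2, falling back to len(word).
import Mathlib
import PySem

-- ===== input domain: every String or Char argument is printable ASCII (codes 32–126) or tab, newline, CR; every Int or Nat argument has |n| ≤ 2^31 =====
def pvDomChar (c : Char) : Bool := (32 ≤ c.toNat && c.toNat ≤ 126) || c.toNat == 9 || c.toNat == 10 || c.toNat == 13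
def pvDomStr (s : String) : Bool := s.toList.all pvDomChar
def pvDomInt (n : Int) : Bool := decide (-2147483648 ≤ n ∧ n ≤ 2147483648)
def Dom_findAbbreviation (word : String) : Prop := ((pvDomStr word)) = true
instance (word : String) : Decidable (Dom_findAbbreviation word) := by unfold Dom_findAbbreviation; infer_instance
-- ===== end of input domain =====

-- B replaces A's per-character state machine (index counter, nextDot flag, accumulated
-- string) by a staged computation: split the word on '.' into runs and return the start
-- offset of the first run of length ≥ 2, falling back to len(word). Same cost, different
-- decomposition.

-- ===== PORT A =====
-- the while loop of A: i is the Python index counter, wordToAdd/nextDot the loop state,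
-- n = len(word) (the fall-through return value); word[i] is always in range here (i < len).
def pyALoop (cs : List Char) (i : Int) (wordToAdd : String) (nextDot : Bool) (n : Int) : Int :=
  match cs with
  | [] => n
  | nextChar :: rest =>
    let i' := i + 1
    if nextChar ≠ '.' then
      if nextDot then i' - 2
      else pyALoop rest i' (wordToAdd.push nextChar) true n
    else pyALoop rest i' wordToAdd false n

def findAbbreviation (word : String) : Int :=
  if PySem.Str.find word "." ≠ 1 then -1
  else pyALoop word.toList 0 "" false (word.toList.length : Int)

-- ===== PORT B =====
-- B's for loop over word.split('.'): pos is the running start offset of the current part;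
-- the fall-through return value is n = len(word).
def partScan (parts : List (List Char)) (pos : Int) (n : Int) : Int :=
  match parts with
  | [] => n
  | part :: rest =>
    if 2 ≤ part.length then pos
    else partScan rest (pos + (part.length : Int) + 1) n

def findAbbreviation_alt (word : String) : Int :=
  if PySem.Str.find word "." ≠ 1 then -1
  else partScan (PySem.Chars.splitOn word.toList ['.']) 0 (word.toList.length : Int)

-- ===== PRECONDITION & SPEC =====
def Spec_findAbbreviation (word : String) (out : Int) : Prop := out = findAbbreviation_alt word
instance (word : String) (out : Int) : Decidable (Spec_findAbbreviation word out) := by unfold Spec_findAbbreviation; infer_instance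

-- ===== CLAIM (what is proved, stated in full; the proofs are below) =====
def Claim_equal_findAbbreviation : Prop := ∀ (word : String), Dom_findAbbreviation word → Spec_findAbbreviation word (findAbbreviation word)

-- ===== LEMMAS AND PROOFS =====

-- proof-side characterisation of splitting on the single character '.'
def dotSplit : List Char → List (List Char)
  | [] => [[]]
  | c :: rest =>
    if c = '.' then [] :: dotSplit rest
    else
      match dotSplit rest with
      | [] => [[c]]      -- unreachable: dotSplit is never []
      | h :: t => (c :: h) :: t

lemma dotSplit_ne_nil (cs : List Char) : dotSplit cs ≠ [] := by
  cases cs with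
  | nil => simp [dotSplit]
  | cons c rest =>
    simp only [dotSplit]
    split_ifs
    · simp
    · cases dotSplit rest <;> simp

-- prepend a list onto the head part
def consHead (x : List Char) : List (List Char) → List (List Char)
  | [] => [x]
  | h :: t => (x ++ h) :: t

lemma splitOn_go_spec (fuel : Nat) :
    ∀ (l cur : List Char) (acc : List (List Char)), l.length ≤ fuel →
      PySem.Chars.splitOn.go ['.'] fuel l cur acc
        = acc.reverse ++ consHead cur.reverse (dotSplit l) := by
  induction fuel with
  | zero =>
    intro l cur acc hl
    have : l = [] := List.length_eq_zero_iff.mp (Nat.le_zero.mp hl)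
    subst this
    simp [PySem.Chars.splitOn.go, dotSplit, consHead]
  | succ fuel ih =>
    intro l cur acc hl
    cases l with
    | nil => simp [PySem.Chars.splitOn.go, dotSplit, consHead]
    | cons c rest =>
      have hr : rest.length ≤ fuel := by simpa using hl
      by_cases hc : c = '.'
      · subst hc
        have hpre : List.isPrefixOf ['.'] ('.' :: rest) = true := by
          simp [List.isPrefixOf]
        rw [show PySem.Chars.splitOn.go ['.'] (fuel + 1) ('.' :: rest) cur acc
              = PySem.Chars.splitOn.go ['.'] fuel rest [] (cur.reverse :: acc) by
            simp [PySem.Chars.splitOn.go, hpre]]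
        rw [ih rest [] (cur.reverse :: acc) hr]
        have h := dotSplit_ne_nil rest
        cases hds : dotSplit rest with
        | nil => exact absurd hds h
        | cons h0 t0 => simp [dotSplit, consHead, hds]
      · have hpre : List.isPrefixOf ['.'] (c :: rest) = false := by
          simp [List.isPrefixOf, Ne.symm hc]
        rw [show PySem.Chars.splitOn.go ['.'] (fuel + 1) (c :: rest) cur acc
              = PySem.Chars.splitOn.go ['.'] fuel rest (c :: cur) acc by
            simp [PySem.Chars.splitOn.go, hpre]]
        rw [ih rest (c :: cur) acc hr]
        have h := dotSplit_ne_nil rest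
        cases hds : dotSplit rest with
        | nil => exact absurd hds h
        | cons h0 t0 => simp [dotSplit, consHead, hds, hc]

lemma splitOn_eq_dotSplit (cs : List Char) :
    PySem.Chars.splitOn cs ['.'] = dotSplit cs := by
  have h := splitOn_go_spec (cs.length + 1) cs [] [] (by omega)
  have hne := dotSplit_ne_nil cs
  cases hds : dotSplit cs with
  | nil => exact absurd hds hne
  | cons h0 t0 =>
    simpa [PySem.Chars.splitOn, hds, consHead] using h

-- A's loop started with nextDot = false computes exactly B's run scan over dotSplit.
lemma pyALoop_eq_partScan (cs : List Char) :
    ∀ (k : Int) (wta : String) (n : Int),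
      pyALoop cs k wta false n = partScan (dotSplit cs) k n := by
  induction cs with
  | nil => intro k wta n; simp [pyALoop, dotSplit, partScan]
  | cons c rest ih =>
    intro k wta n
    by_cases hc : c = '.'
    · subst hc
      have hL : pyALoop ('.' :: rest) k wta false n = pyALoop rest (k + 1) wta false n := by
        simp [pyALoop]
      rw [hL, ih (k + 1) wta n]
      simp [dotSplit, partScan]
    · match rest with
      | [] => simp [pyALoop, dotSplit, partScan, hc]
      | d :: rest2 =>
        by_cases hd : d = '.'
        · subst hd
          -- A: c consumed (nextDot := true), then '.' resets; continue on rest2 at k+2.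
          have h1 := ih (k + 1) (wta.push c) n
          have h2 : pyALoop ('.' :: rest2) (k + 1) (wta.push c) false n
              = pyALoop rest2 (k + 2) (wta.push c) false n := by
            simp [pyALoop]; ring_nf
          have hL : pyALoop (c :: '.' :: rest2) k wta false n
              = pyALoop rest2 (k + 2) (wta.push c) false n := by
            simp [pyALoop, hc]; ring_nf
          rw [hL, ← h2, h1]
          simp [dotSplit, partScan, hc]
        · -- two adjacent non-dots: A returns (k+2)-2 = k; B sees a head run of length ≥ 2.
          have hds := dotSplit_ne_nil rest2
          cases h2 : dotSplit rest2 with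
          | nil => exact absurd h2 hds
          | cons h0 t0 =>
            simp [pyALoop, dotSplit, partScan, hc, hd, h2]
            ring

-- ===== VERDICT (by name: the statement is the Claim_ definition above) =====
theorem findAbbreviation_spec : Claim_equal_findAbbreviation := by
  intro word _
  unfold Spec_findAbbreviation findAbbreviation findAbbreviation_alt
  split_ifs with h
  · rfl
  · rw [splitOn_eq_dotSplit, pyALoop_eq_partScan]
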